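-- pv_equiv track=rewrite | github.com/Raingel/nanoact2 | nanoact2/nanoact2.py | _IUPACde
-- ===== SOURCE A (Python) =====
-- def _IUPACde(seq: str) -> str:
--     """
--     Convert IUPAC ambiguous DNA codes in a sequence to regex character classes.
--     """
--     seq = seq.upper()
--     replacements = {
--         "R": "[AG]", "Y": "[CT]", "S": "[GC]", "W": "[AT]",
--         "K": "[GT]", "M": "[AC]", "B": "[CGT]", "D": "[AGT]",
--         "H": "[ACT]", "V": "[ACG]", "N": "[ACGT]"
--     }
--     for code, repl in replacements.items():
--         seq = seq.replace(code, repl)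
--     return seq
-- ===== SOURCE B (Python) =====
-- def _IUPACde(seq: str) -> str:
--     """
--     Convert IUPAC ambiguous DNA codes in a sequence to regex character classes.
--     """
--     table = {
--         "R": "[AG]", "Y": "[CT]", "S": "[GC]", "W": "[AT]",
--         "K": "[GT]", "M": "[AC]", "B": "[CGT]", "D": "[AGT]",
--         "H": "[ACT]", "V": "[ACG]", "N": "[ACGT]"
--     }
--     return "".join(table.get(c, c) for c in seq.upper())
-- ===== Notes on version B (the rewrite author's own statement) =====
-- stated objective: simpler
-- what changed: A rewrites the whole string eleven times, one str.replace scan per IUPAC code; B makes a single left-to-right pass over the characters, joining a per-character table lookup (table.get(c, c)).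
import Mathlib
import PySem

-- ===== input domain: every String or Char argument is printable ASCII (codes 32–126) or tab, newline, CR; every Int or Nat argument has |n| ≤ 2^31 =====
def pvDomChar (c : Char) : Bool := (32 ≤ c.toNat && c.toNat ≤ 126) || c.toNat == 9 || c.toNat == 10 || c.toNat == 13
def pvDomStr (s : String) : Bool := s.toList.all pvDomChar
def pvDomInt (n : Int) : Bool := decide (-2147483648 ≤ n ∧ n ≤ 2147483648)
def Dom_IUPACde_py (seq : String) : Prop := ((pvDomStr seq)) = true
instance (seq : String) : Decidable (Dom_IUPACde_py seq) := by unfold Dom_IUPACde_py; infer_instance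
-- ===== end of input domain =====

-- B replaces A's eleven whole-string str.replace passes with one left-to-right pass that
-- looks each character up in the table ("".join(table.get(c, c) for c in seq.upper())).

-- ===== PORT A =====
def IUPACde_py (seq : String) : String :=
  let replacements : PySem.Dict String String :=
    ⟨[("R", "[AG]"), ("Y", "[CT]"), ("S", "[GC]"), ("W", "[AT]"),
      ("K", "[GT]"), ("M", "[AC]"), ("B", "[CGT]"), ("D", "[AGT]"),
      ("H", "[ACT]"), ("V", "[ACG]"), ("N", "[ACGT]")]⟩
  replacements.items.foldl (fun s p => PySem.Str.replace s p.1 p.2) (PySem.Str.upper seq)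

-- ===== PORT B =====
def iupacTable : PySem.Dict Char String :=
  ⟨[('R', "[AG]"), ('Y', "[CT]"), ('S', "[GC]"), ('W', "[AT]"),
    ('K', "[GT]"), ('M', "[AC]"), ('B', "[CGT]"), ('D', "[AGT]"),
    ('H', "[ACT]"), ('V', "[ACG]"), ('N', "[ACGT]")]⟩

def IUPACde_py_alt (seq : String) : String :=
  PySem.Str.join "" ((PySem.Str.upper seq).toList.map
    (fun c => iupacTable.getD c (String.ofList [c])))

-- ===== PRECONDITION & SPEC =====
def Spec_IUPACde_py (seq : String) (out : String) : Prop := out = IUPACde_py_alt seq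
instance (seq : String) (out : String) : Decidable (Spec_IUPACde_py seq out) := by unfold Spec_IUPACde_py; infer_instance

-- ===== CLAIM (what is proved, stated in full; the proofs are below) =====
def Claim_equal_IUPACde_py : Prop := ∀ (seq : String), Dom_IUPACde_py seq → Spec_IUPACde_py seq (IUPACde_py seq)

-- ===== LEMMAS AND PROOFS =====

-- the effect of one str.replace pass with a single-character needle, per character
def rep1 (k : Char) (new : List Char) (x : Char) : List Char := if x = k then new else [x]

theorem go_single (k : Char) (new : List Char) :
    ∀ (l : List Char) (fuel : Nat) (acc : List Char), l.length ≤ fuel →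
      PySem.Chars.replace.go [k] new fuel l acc = acc.reverse ++ l.flatMap (rep1 k new) := by
  intro l
  induction l with
  | nil => intro fuel acc _; cases fuel <;> simp [PySem.Chars.replace.go]
  | cons c t ih =>
    intro fuel acc h
    cases fuel with
    | zero => simp at h
    | succ n =>
      simp only [PySem.Chars.replace.go]
      by_cases hc : c = k
      · subst hc
        have : [c].isPrefixOf (c :: t) = true := by simp [List.isPrefixOf]
        rw [if_pos this]
        simp only [List.length_singleton, List.drop_one, List.tail_cons]
        rw [ih n (new.reverse ++ acc) (by simpa using h)]
        simp [rep1]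
      · have hp : [k].isPrefixOf (c :: t) = false := by
          simp [List.isPrefixOf]; exact fun h' => (hc h'.symm).elim
        rw [if_neg (by simp [hp])]
        rw [ih n (c :: acc) (by simpa using Nat.le_of_succ_le_succ h)]
        simp [rep1, hc]

theorem replace_single (s : List Char) (k : Char) (new : List Char) :
    PySem.Chars.replace s [k] new = s.flatMap (rep1 k new) := by
  rw [PySem.Chars.replace]
  simp only [List.isEmpty_cons, Bool.false_eq_true, if_false]
  exact go_single k new s s.length [] le_rfl

theorem join_nil_flatten (l : List (List Char)) : PySem.Chars.join [] l = l.flatten := by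
  rw [PySem.Chars.join]
  induction l with
  | nil => rfl
  | cons a t ih =>
    cases t with
    | nil => simp [List.intercalate]
    | cons b u =>
      rw [List.intercalate] at ih ⊢
      simp only [List.intersperse_cons₂, List.flatten_cons] at ih ⊢
      simp [ih]

def tget (c : Char) : List Char := (iupacTable.getD c (String.ofList [c])).toList

theorem tget_nonkey (c : Char) (h1 : c ≠ 'R') (h2 : c ≠ 'Y') (h3 : c ≠ 'S') (h4 : c ≠ 'W')
    (h5 : c ≠ 'K') (h6 : c ≠ 'M') (h7 : c ≠ 'B') (h8 : c ≠ 'D') (h9 : c ≠ 'H') (h10 : c ≠ 'V')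
    (h11 : c ≠ 'N') : tget c = [c] := by
  have e1 : ('R' == c) = false := beq_eq_false_iff_ne.mpr (Ne.symm h1)
  have e2 : ('Y' == c) = false := beq_eq_false_iff_ne.mpr (Ne.symm h2)
  have e3 : ('S' == c) = false := beq_eq_false_iff_ne.mpr (Ne.symm h3)
  have e4 : ('W' == c) = false := beq_eq_false_iff_ne.mpr (Ne.symm h4)
  have e5 : ('K' == c) = false := beq_eq_false_iff_ne.mpr (Ne.symm h5)
  have e6 : ('M' == c) = false := beq_eq_false_iff_ne.mpr (Ne.symm h6)
  have e7 : ('B' == c) = false := beq_eq_false_iff_ne.mpr (Ne.symm h7)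
  have e8 : ('D' == c) = false := beq_eq_false_iff_ne.mpr (Ne.symm h8)
  have e9 : ('H' == c) = false := beq_eq_false_iff_ne.mpr (Ne.symm h9)
  have e10 : ('V' == c) = false := beq_eq_false_iff_ne.mpr (Ne.symm h10)
  have e11 : ('N' == c) = false := beq_eq_false_iff_ne.mpr (Ne.symm h11)
  simp [tget, iupacTable, PySem.Dict.getD, PySem.Dict.get?, List.find?,
    e1, e2, e3, e4, e5, e6, e7, e8, e9, e10, e11]

-- the value of A's eleven cascaded per-character substitutions at a single character
theorem point (c : Char) :
    ((rep1 'R' "[AG]".toList c).flatMap fun x1 =>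
      (rep1 'Y' "[CT]".toList x1).flatMap fun x2 =>
      (rep1 'S' "[GC]".toList x2).flatMap fun x3 =>
      (rep1 'W' "[AT]".toList x3).flatMap fun x4 =>
      (rep1 'K' "[GT]".toList x4).flatMap fun x5 =>
      (rep1 'M' "[AC]".toList x5).flatMap fun x6 =>
      (rep1 'B' "[CGT]".toList x6).flatMap fun x7 =>
      (rep1 'D' "[AGT]".toList x7).flatMap fun x8 =>
      (rep1 'H' "[ACT]".toList x8).flatMap fun x9 =>
      (rep1 'V' "[ACG]".toList x9).flatMap (rep1 'N' "[ACGT]".toList)) = tget c := by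
  by_cases h1 : c = 'R';  · subst h1; decide
  by_cases h2 : c = 'Y';  · subst h2; decide
  by_cases h3 : c = 'S';  · subst h3; decide
  by_cases h4 : c = 'W';  · subst h4; decide
  by_cases h5 : c = 'K';  · subst h5; decide
  by_cases h6 : c = 'M';  · subst h6; decide
  by_cases h7 : c = 'B';  · subst h7; decide
  by_cases h8 : c = 'D';  · subst h8; decide
  by_cases h9 : c = 'H';  · subst h9; decide
  by_cases h10 : c = 'V'; · subst h10; decide
  by_cases h11 : c = 'N'; · subst h11; decide
  rw [tget_nonkey c h1 h2 h3 h4 h5 h6 h7 h8 h9 h10 h11]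
  simp [rep1, h1, h2, h3, h4, h5, h6, h7, h8, h9, h10, h11]

theorem toList_eq (seq : String) : (IUPACde_py seq).toList = (IUPACde_py_alt seq).toList := by
  have hR : ("R" : String).toList = ['R'] := rfl
  have hY : ("Y" : String).toList = ['Y'] := rfl
  have hS : ("S" : String).toList = ['S'] := rfl
  have hW : ("W" : String).toList = ['W'] := rfl
  have hK : ("K" : String).toList = ['K'] := rfl
  have hM : ("M" : String).toList = ['M'] := rfl
  have hB : ("B" : String).toList = ['B'] := rfl
  have hD : ("D" : String).toList = ['D'] := rfl
  have hH : ("H" : String).toList = ['H'] := rfl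
  have hV : ("V" : String).toList = ['V'] := rfl
  have hN : ("N" : String).toList = ['N'] := rfl
  simp only [IUPACde_py, IUPACde_py_alt, List.foldl_cons, List.foldl_nil,
    PySem.Str.toList_replace, PySem.Str.toList_join, PySem.Str.toList_upper,
    hR, hY, hS, hW, hK, hM, hB, hD, hH, hV, hN, replace_single, List.flatMap_assoc]
  rw [show ("" : String).toList = [] from rfl, join_nil_flatten, List.map_map]
  rw [List.flatten_eq_flatMap, List.flatMap_map]
  congr 1
  funext c
  exact point c

-- ===== VERDICT (by name: the statement is the Claim_ definition above) =====
theorem IUPACde_py_spec : Claim_equal_IUPACde_py := by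
  intro seq _
  unfold Spec_IUPACde_py
  exact String.ext (by simpa [String.toList] using toList_eq seq)
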